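-- pv_equiv track=rewrite | github.com/agardnerIT/devreltoolbox | app.py | _pick_browser_recorder_default_model
-- ===== SOURCE A (Python) =====
-- def _pick_browser_recorder_default_model(models: list[str], configured_model: str) -> str:
--     """Pick a fast modern default model from available options."""
--     preferred = [
--         "gpt-5-1",
--         "gpt-4.1-mini",
--         "gpt-4o-mini",
--         "gpt-5-mini",
--         "claude-3-5-haiku",
--         "claude-3-haiku",
--     ]
--     lowered = {m.lower(): m for m in models}
--     for pref in preferred:
--         for lm, original in lowered.items():
--             if pref in lm:
--                 return original
--
--     if configured_model in models:
--         return configured_model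
--
--     return models[0] if models else configured_model
-- ===== SOURCE B (Python) =====
-- def _pick_browser_recorder_default_model(models: list[str], configured_model: str) -> str:
--     """Pick a fast modern default model: single pass minimizing (preferred-rank, position)."""
--     preferred = [
--         "gpt-5-1",
--         "gpt-4.1-mini",
--         "gpt-4o-mini",
--         "gpt-5-mini",
--         "claude-3-5-haiku",
--         "claude-3-haiku",
--     ]
--     lowered = {m.lower(): m for m in models}
--     best = None  # (rank, position, original)
--     for pos, (lm, original) in enumerate(lowered.items()):
--         rank = next((i for i, p in enumerate(preferred) if p in lm), None)
--         if rank is None: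
--             continue
--         if best is None or rank < best[0] or (rank == best[0] and pos < best[1]):
--             best = (rank, pos, original)
--     if best is not None:
--         return best[2]
--     return configured_model if (configured_model in models or not models) else models[0]
-- ===== Notes on version B (the rewrite author's own statement) =====
-- stated objective: alternative
-- what changed: Replaces A's nested preferred-by-preferred rescan of the lowered dict with a single pass over the dict items that computes each model's best preferred rank once and keeps the entry minimizing (rank, position).
import Mathlib
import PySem

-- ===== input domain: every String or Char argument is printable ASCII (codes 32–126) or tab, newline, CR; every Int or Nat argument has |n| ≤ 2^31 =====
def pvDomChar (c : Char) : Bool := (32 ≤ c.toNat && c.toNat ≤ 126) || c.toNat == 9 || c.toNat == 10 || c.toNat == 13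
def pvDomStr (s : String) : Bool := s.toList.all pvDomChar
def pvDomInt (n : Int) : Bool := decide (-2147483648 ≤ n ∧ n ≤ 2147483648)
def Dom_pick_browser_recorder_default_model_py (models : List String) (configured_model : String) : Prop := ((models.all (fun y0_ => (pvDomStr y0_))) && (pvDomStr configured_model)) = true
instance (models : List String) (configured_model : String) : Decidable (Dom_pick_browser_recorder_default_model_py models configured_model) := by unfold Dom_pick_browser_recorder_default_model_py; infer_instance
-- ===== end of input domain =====

-- B replaces A's nested preferred-by-preferred rescan of the dict with one pass over the
-- dict items minimizing (best preferred rank, position); objective: alternative decomposition.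

-- ===== PORT A =====
-- nested loop: for pref in preferred: for (lm, original) in lowered.items(): if pref in lm: return original
def pvLoopA : List String → List (String × String) → Option String
  | [], _ => none
  | p :: rest, items =>
    match items.find? (fun e => PySem.Str.isIn p e.1) with
    | some e => some e.2
    | none => pvLoopA rest items

def pick_browser_recorder_default_model_py (models : List String) (configured_model : String) : String :=
  let preferred := ["gpt-5-1", "gpt-4.1-mini", "gpt-4o-mini", "gpt-5-mini", "claude-3-5-haiku", "claude-3-haiku"]
  let lowered := models.foldl (fun d m => d.insert (PySem.Str.lower m) m) (PySem.Dict.empty)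
  match pvLoopA preferred lowered.items with
  | some original => original
  | none =>
    if models.contains configured_model then configured_model
    else match models with
      | [] => configured_model
      | m :: _ => m

-- ===== PORT B =====
-- rank = next((i for i, p in enumerate(preferred) if p in lm), None)
def pvRankB (preferred : List String) (lm : String) : Option Int :=
  ((PySem.List.enumerate preferred).find? (fun ip => PySem.Str.isIn ip.2 lm)).map (·.1)

-- loop body: update best = (rank, pos, original) when rank improves (rank, pos) lexicographically
def pvStepB (preferred : List String) (best : Option (Int × Int × String)) (pe : Int × (String × String)) : Option (Int × Int × String) :=
  match pvRankB preferred pe.2.1 with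
  | none => best
  | some r =>
    match best with
    | none => some (r, pe.1, pe.2.2)
    | some b => if r < b.1 ∨ (r = b.1 ∧ pe.1 < b.2.1) then some (r, pe.1, pe.2.2) else best

def pick_browser_recorder_default_model_py_alt (models : List String) (configured_model : String) : String :=
  let preferred := ["gpt-5-1", "gpt-4.1-mini", "gpt-4o-mini", "gpt-5-mini", "claude-3-5-haiku", "claude-3-haiku"]
  let lowered := models.foldl (fun d m => d.insert (PySem.Str.lower m) m) (PySem.Dict.empty)
  let best := (PySem.List.enumerate lowered.items).foldl (pvStepB preferred) none
  match best with
  | some b => b.2.2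
  | none =>
    if models.contains configured_model || models.isEmpty then configured_model
    else match models with
      | m :: _ => m
      | [] => configured_model  -- unreachable: models.isEmpty was handled above (totalization only)

-- ===== PRECONDITION & SPEC =====
def Spec_pick_browser_recorder_default_model_py (models : List String) (configured_model : String) (out : String) : Prop := out = pick_browser_recorder_default_model_py_alt models configured_model
instance (models : List String) (configured_model : String) (out : String) : Decidable (Spec_pick_browser_recorder_default_model_py models configured_model out) := by unfold Spec_pick_browser_recorder_default_model_py; infer_instance

-- ===== CLAIM (what is proved, stated in full; the proofs are below) =====
def Claim_equal_pick_browser_recorder_default_model_py : Prop := ∀ (models : List String) (configured_model : String), Dom_pick_browser_recorder_default_model_py models configured_model → Spec_pick_browser_recorder_default_model_py models configured_model (pick_browser_recorder_default_model_py models configured_model)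

-- ===== LEMMAS AND PROOFS =====

-- functional characterization of B's fold: first entry minimizing (rank, position)
def pvBestOf (rank : String → Option Int) : Int → List (String × String) → Option (Int × Int × String)
  | _, [] => none
  | k, e :: t =>
    match rank e.1, pvBestOf rank (k + 1) t with
    | none, b => b
    | some r, none => some (r, k, e.2)
    | some r, some b => if b.1 < r then some b else some (r, k, e.2)

theorem pvStepB_eq (preferred : List String) :
    pvStepB preferred = fun best pe =>
      match pvRankB preferred pe.2.1 with
      | none => best
      | some r =>
        match best with
        | none => some (r, pe.1, pe.2.2)
        | some b => if r < b.1 ∨ (r = b.1 ∧ pe.1 < b.2.1) then some (r, pe.1, pe.2.2) else best := rfl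

theorem pvFold_some (rank : String → Option Int) (step : Option (Int × Int × String) → (Int × (String × String)) → Option (Int × Int × String))
    (hstep : step = fun best pe =>
      match rank pe.2.1 with
      | none => best
      | some r =>
        match best with
        | none => some (r, pe.1, pe.2.2)
        | some b => if r < b.1 ∨ (r = b.1 ∧ pe.1 < b.2.1) then some (r, pe.1, pe.2.2) else best)
    (t : List (String × String)) :
    ∀ (k br bp : Int) (o : String), bp < k →
      (PySem.List.enumerate t k).foldl step (some (br, bp, o)) =
        match pvBestOf rank k t with
        | none => some (br, bp, o)
        | some b => if b.1 < br then some b else some (br, bp, o) := by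
  subst hstep
  induction t with
  | nil => intro k br bp o h; simp [pvBestOf, PySem.List.enumerate_nil]
  | cons e t ih =>
    intro k br bp o h
    rw [PySem.List.enumerate_cons]
    cases hre : rank e.1 with
    | none =>
      simp only [List.foldl_cons, hre]
      rw [ih (k+1) br bp o (by omega)]
      simp [pvBestOf, hre]
    | some r =>
      simp only [List.foldl_cons, hre]
      by_cases hlt : r < br
      · have hc : (r < br ∨ (r = br ∧ k < bp)) := Or.inl hlt
        simp only [if_pos hc]
        rw [ih (k+1) r k e.2 (by omega)]
        cases hb : pvBestOf rank (k+1) t with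
        | none => simp [pvBestOf, hre, hb, hlt]
        | some b =>
          simp only [pvBestOf, hre, hb]
          by_cases hb1 : b.1 < r
          · simp only [if_pos hb1]
            have : b.1 < br := by omega
            simp [this]
          · simp only [if_neg hb1]
            simp [hlt]
      · have hc : ¬ (r < br ∨ (r = br ∧ k < bp)) := by omega
        simp only [if_neg hc]
        rw [ih (k+1) br bp o (by omega)]
        cases hb : pvBestOf rank (k+1) t with
        | none =>
          simp only [pvBestOf, hre, hb]
          simp [hlt]
        | some b =>
          simp only [pvBestOf, hre, hb]
          by_cases hb1 : b.1 < r
          · simp only [if_pos hb1]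
          · simp only [if_neg hb1]
            have : ¬ b.1 < br := by omega
            simp [this, hlt]

theorem pvFold_none (rank : String → Option Int) (step : Option (Int × Int × String) → (Int × (String × String)) → Option (Int × Int × String))
    (hstep : step = fun best pe =>
      match rank pe.2.1 with
      | none => best
      | some r =>
        match best with
        | none => some (r, pe.1, pe.2.2)
        | some b => if r < b.1 ∨ (r = b.1 ∧ pe.1 < b.2.1) then some (r, pe.1, pe.2.2) else best)
    (t : List (String × String)) :
    ∀ (k : Int), (PySem.List.enumerate t k).foldl step none = pvBestOf rank k t := by
  induction t with
  | nil => intro k; simp [hstep, pvBestOf, PySem.List.enumerate_nil]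
  | cons e t ih =>
    intro k
    rw [PySem.List.enumerate_cons]
    cases hre : rank e.1 with
    | none =>
      simp only [List.foldl_cons, hstep, hre]
      rw [← hstep, ih (k+1)]
      simp [pvBestOf, hre]
    | some r =>
      simp only [List.foldl_cons, hstep, hre]
      rw [← hstep, pvFold_some rank step hstep t (k+1) r k e.2 (by omega)]
      cases hb : pvBestOf rank (k+1) t with
      | none => simp [pvBestOf, hre, hb]
      | some b => simp [pvBestOf, hre, hb]

theorem pvBestOf_none (rank : String → Option Int) (t : List (String × String))
    (h : ∀ e ∈ t, rank e.1 = none) : ∀ k, pvBestOf rank k t = none := by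
  induction t with
  | nil => intro k; rfl
  | cons e t ih =>
    intro k
    have he : rank e.1 = none := h e (by simp)
    simp only [pvBestOf, he]
    exact ih (fun x hx => h x (by simp [hx])) (k+1)

theorem pvBestOf_rank_nonneg (rank : String → Option Int)
    (hnn : ∀ s r, rank s = some r → 0 ≤ r) :
    ∀ (t : List (String × String)) (k : Int) b, pvBestOf rank k t = some b → 0 ≤ b.1 := by
  intro t
  induction t with
  | nil => intro k b hb; simp [pvBestOf] at hb
  | cons e t ih =>
    intro k b hb
    cases hre : rank e.1 with
    | none =>
      simp only [pvBestOf, hre] at hb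
      exact ih (k+1) b hb
    | some r =>
      have hr0 : 0 ≤ r := hnn _ _ hre
      cases hb' : pvBestOf rank (k+1) t with
      | none =>
        simp only [pvBestOf, hre, hb'] at hb
        rw [← Option.some.inj hb]
        exact hr0
      | some c =>
        simp only [pvBestOf, hre, hb'] at hb
        by_cases h1 : c.1 < r
        · rw [if_pos h1] at hb
          rw [← Option.some.inj hb]
          exact ih (k+1) c hb'
        · rw [if_neg h1] at hb
          rw [← Option.some.inj hb]
          exact hr0

set_option maxHeartbeats 1600000 in
theorem pvBestOf_zero (rank : String → Option Int) (p : String)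
    (h0 : ∀ s, PySem.Str.isIn p s = true ↔ rank s = some 0)
    (hnn : ∀ s r, rank s = some r → 0 ≤ r) :
    ∀ (t : List (String × String)) (k : Int) (e : String × String),
      t.find? (fun e => PySem.Str.isIn p e.1) = some e →
      ∃ q, pvBestOf rank k t = some (0, q, e.2) := by
  intro t
  induction t with
  | nil => intro k e hf; simp at hf
  | cons x t ih =>
    intro k e hf
    by_cases hx : PySem.Str.isIn p x.1 = true
    · rw [@List.find?_cons_of_pos _ (fun e => PySem.Str.isIn p e.1) x t hx] at hf
      rw [← Option.some.inj hf]
      have hr0 : rank x.1 = some 0 := (h0 x.1).1 hx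
      cases hb : pvBestOf rank (k+1) t with
      | none => exact ⟨k, by simp only [pvBestOf, hr0, hb]⟩
      | some b =>
        have : 0 ≤ b.1 := pvBestOf_rank_nonneg rank hnn t (k+1) b hb
        have hnlt : ¬ b.1 < 0 := by omega
        exact ⟨k, by simp only [pvBestOf, hr0, hb, if_neg hnlt]⟩
    · rw [@List.find?_cons_of_neg _ (fun e => PySem.Str.isIn p e.1) x t hx] at hf
      obtain ⟨q, hq⟩ := ih (k+1) e hf
      cases hrx : rank x.1 with
      | none => exact ⟨q, by simp only [pvBestOf, hrx, hq]⟩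
      | some r =>
        have hr0 : 0 ≤ r := hnn _ _ hrx
        have hrne : r ≠ 0 := by
          intro hcontra; subst hcontra
          exact hx ((h0 x.1).2 hrx)
        have hlt : (0:Int) < r := by omega
        refine ⟨q, ?_⟩
        simp only [pvBestOf, hrx, hq]
        rw [if_pos (show ((0:Int),q,e.2).1 < r from hlt)]

theorem pvBestOf_shift (rank rank' : String → Option Int) :
    ∀ (t : List (String × String)), (∀ e ∈ t, rank' e.1 = (rank e.1).map (· + 1)) →
      ∀ k, pvBestOf rank' k t = (pvBestOf rank k t).map (fun b => (b.1 + 1, b.2)) := by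
  intro t h
  induction t with
  | nil => intro k; rfl
  | cons e t ih =>
    intro k
    have he : rank' e.1 = (rank e.1).map (· + 1) := h e (by simp)
    have iht := ih (fun x hx => h x (by simp [hx])) (k+1)
    cases hre : rank e.1 with
    | none =>
      have : rank' e.1 = none := by rw [he, hre]; rfl
      simp only [pvBestOf, this, hre, iht]
    | some r =>
      have hre' : rank' e.1 = some (r + 1) := by rw [he, hre]; rfl
      cases hb : pvBestOf rank (k+1) t with
      | none =>
        have : pvBestOf rank' (k+1) t = none := by rw [iht, hb]; rfl
        simp [pvBestOf, hre, hre', this, hb]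
      | some b =>
        have hb' : pvBestOf rank' (k+1) t = some (b.1 + 1, b.2) := by rw [iht, hb]; rfl
        by_cases h1 : b.1 < r
        · have h2 : b.1 + 1 < r + 1 := by omega
          simp [pvBestOf, hre, hre', hb, hb', h1, h2]
        · have h2 : ¬ b.1 + 1 < r + 1 := by omega
          simp [pvBestOf, hre, hre', hb, hb', h1, h2]

theorem pvRankB_nil (lm : String) : pvRankB [] lm = none := rfl

theorem pvEnum_find_shift (f : String → Bool) (xs : List String) :
    ∀ s : Int, (PySem.List.enumerate xs s).find? (fun ip => f ip.2) =
      ((PySem.List.enumerate xs 0).find? (fun ip => f ip.2)).map (fun ip => (ip.1 + s, ip.2)) := by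
  induction xs with
  | nil => intro s; simp [PySem.List.enumerate_nil]
  | cons x xs ih =>
    intro s
    rw [PySem.List.enumerate_cons, PySem.List.enumerate_cons]
    by_cases hx : f x = true
    · rw [@List.find?_cons_of_pos _ (fun ip => f ip.2) (s, x) _ hx,
        @List.find?_cons_of_pos _ (fun ip => f ip.2) ((0 : Int), x) _ hx]
      simp
    · rw [@List.find?_cons_of_neg _ (fun ip => f ip.2) (s, x) _ hx,
        @List.find?_cons_of_neg _ (fun ip => f ip.2) ((0 : Int), x) _ hx]
      rw [ih (s+1), ih (0+1)]
      cases (PySem.List.enumerate xs 0).find? (fun ip => f ip.2) with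
      | none => rfl
      | some ip => simp; ring

theorem pvRankB_cons (p : String) (rest : List String) (lm : String) :
    pvRankB (p :: rest) lm =
      if PySem.Str.isIn p lm then some 0 else (pvRankB rest lm).map (· + 1) := by
  unfold pvRankB
  rw [PySem.List.enumerate_cons]
  by_cases hx : PySem.Str.isIn p lm = true
  · rw [@List.find?_cons_of_pos _ (fun ip => PySem.Str.isIn ip.2 lm) ((0 : Int), p) _ hx, if_pos hx]
    rfl
  · rw [@List.find?_cons_of_neg _ (fun ip => PySem.Str.isIn ip.2 lm) ((0 : Int), p) _ hx, if_neg hx]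
    rw [pvEnum_find_shift (fun q => PySem.Str.isIn q lm) rest (0+1)]
    cases (PySem.List.enumerate rest 0).find? (fun ip => PySem.Str.isIn ip.2 lm) with
    | none => rfl
    | some ip => simp

theorem pvRankB_nonneg (prefs : List String) (lm : String) (r : Int)
    (h : pvRankB prefs lm = some r) : 0 ≤ r := by
  induction prefs generalizing r with
  | nil => simp [pvRankB, PySem.List.enumerate_nil] at h
  | cons p rest ih =>
    rw [pvRankB_cons] at h
    by_cases hx : PySem.Str.isIn p lm = true
    · rw [if_pos hx] at h; cases h; omega
    · rw [if_neg hx] at h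
      cases hr : pvRankB rest lm with
      | none => rw [hr] at h; cases h
      | some r' =>
        rw [hr] at h
        have h2 : r' + 1 = r := by simpa using h
        have := ih r' hr
        omega

theorem pvMain (prefs : List String) (items : List (String × String)) :
    pvLoopA prefs items = (pvBestOf (pvRankB prefs) 0 items).map (·.2.2) := by
  induction prefs generalizing items with
  | nil =>
    rw [pvBestOf_none (pvRankB []) items (fun e _ => pvRankB_nil e.1) 0]
    rfl
  | cons p rest ih =>
    cases hf : items.find? (fun e => PySem.Str.isIn p e.1) with
    | some e =>
      have h0 : ∀ s, PySem.Str.isIn p s = true ↔ pvRankB (p :: rest) s = some 0 := by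
        intro s
        rw [pvRankB_cons]
        constructor
        · intro hs; rw [if_pos hs]
        · intro hs
          by_contra hns
          rw [if_neg hns] at hs
          cases hr : pvRankB rest s with
          | none => rw [hr] at hs; cases hs
          | some r' =>
            rw [hr] at hs
            have h1 := pvRankB_nonneg rest s r' hr
            have h2 : r' + 1 = 0 := by simpa using hs
            omega
      obtain ⟨q, hq⟩ := pvBestOf_zero (pvRankB (p :: rest)) p h0
        (fun s r hr => pvRankB_nonneg _ s r hr) items 0 e hf
      simp only [pvLoopA, hf, hq, Option.map_some]
    | none =>
      have hall : ∀ e ∈ items, pvRankB (p :: rest) e.1 = (pvRankB rest e.1).map (· + 1) := by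
        intro e he
        have hx := List.find?_eq_none.1 hf e he
        rw [pvRankB_cons, if_neg (by simpa using hx)]
      rw [pvBestOf_shift (pvRankB rest) (pvRankB (p :: rest)) items hall 0]
      simp only [pvLoopA, hf]
      rw [ih items]
      cases pvBestOf (pvRankB rest) 0 items with
      | none => rfl
      | some b => rfl

-- ===== VERDICT (by name: the statement is the Claim_ definition above) =====
theorem pick_browser_recorder_default_model_py_spec : Claim_equal_pick_browser_recorder_default_model_py := by
  intro models configured_model _
  unfold Spec_pick_browser_recorder_default_model_py
  unfold pick_browser_recorder_default_model_py pick_browser_recorder_default_model_py_alt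
  dsimp only
  rw [pvFold_none (pvRankB ["gpt-5-1", "gpt-4.1-mini", "gpt-4o-mini", "gpt-5-mini", "claude-3-5-haiku", "claude-3-haiku"]) _ (pvStepB_eq _)]
  rw [pvMain]
  cases pvBestOf (pvRankB ["gpt-5-1", "gpt-4.1-mini", "gpt-4o-mini", "gpt-5-mini", "claude-3-5-haiku", "claude-3-haiku"]) 0
      ((models.foldl (fun d m => d.insert (PySem.Str.lower m) m) PySem.Dict.empty).items) with
  | some b => rfl
  | none =>
    cases models with
    | nil => simp
    | cons m rest =>
      simp
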